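-- pv_equiv track=rewrite | github.com/nilsgoksor/AdvancedWebSecurity | Assignment5/der.py | der_encode
-- ===== SOURCE A (Python) =====
-- def int_to_bits(our_bits, chars=0):
--     return "{0:b}".format(our_bits).zfill(chars)
--
-- def der_encode(integer, ldf=True):
--     T = "02"
--     V = ""
--     # Pad V so it becomes even octets
--     V = hex(integer)[2:]
--     bitVector = "0" + int_to_bits(int(V,16))
--     if len(bitVector) % 8 != 0:
--         charsMissing = 8 - (len(bitVector) % 8)
--         bitVector = "0" * charsMissing + bitVector
--
--     V_length = int(len(bitVector) / 8)
--     V = hex(int(bitVector,2))[2:]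
--     while V_length > len(V)/2:
--         V = "0" + V
--
--     # Create L
--     # 0-128 octets - normal
--     if V_length <= 127:
--         L = hex(V_length)[2:]
--         if len(L) % 2 == 1:
--             L = "0" + str(L)
--         else:
--             L = str(L)
--     # >128 octets - long definite form
--     else:
--         if ldf:
--             L = longDefiniteForm(V)
--         else:
--             L = "10000000"
--             V += "0" * 8 * 2
--
--     return T + L + V
--
-- def longDefiniteForm(V):
--     V_int = int(len(V) / 2)
--     V_hex = hex(V_int)[2:]
--
--     # Add padding, we want full octets
--     if len(V_hex) % 2 != 0:
--         V_hex = "0" + V_hex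
--
--     if len(V_hex) > 2 or int_to_bits(V_int, 8)[0] == "1":
--         L_int = int(len(V_hex) / 2)
--         L_bits = int_to_bits(L_int, 7)
--         L_bits = "1" + L_bits
--         L_hex = hex(int(L_bits, 2))[2:]
--         L = L_hex + V_hex
--     else:
--         L = V_hex
--
--     return L
-- ===== SOURCE B (Python) =====
-- def der_encode(integer, ldf=True):
--     v_len = integer.bit_length() // 8 + 1
--     V = integer.to_bytes(v_len, 'big').hex()
--     if v_len <= 127:
--         L = format(v_len, '02x')
--     elif ldf:
--         num = (v_len.bit_length() + 7) // 8
--         L = format(0x80 | num, '02x') + v_len.to_bytes(num, 'big').hex()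
--     else:
--         L = "10000000"
--         V += "0" * 16
--     return "02" + L + V
-- ===== Notes on version B (the rewrite author's own statement) =====
-- stated objective: simpler
-- what changed: B computes the value octets and their count directly with bit_length//8+1 and to_bytes(...).hex() and builds the length octets by integer arithmetic, replacing A's build-a-bit-string/pad/re-parse pipeline (and its longDefiniteForm bit-string helper).
import Mathlib
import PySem

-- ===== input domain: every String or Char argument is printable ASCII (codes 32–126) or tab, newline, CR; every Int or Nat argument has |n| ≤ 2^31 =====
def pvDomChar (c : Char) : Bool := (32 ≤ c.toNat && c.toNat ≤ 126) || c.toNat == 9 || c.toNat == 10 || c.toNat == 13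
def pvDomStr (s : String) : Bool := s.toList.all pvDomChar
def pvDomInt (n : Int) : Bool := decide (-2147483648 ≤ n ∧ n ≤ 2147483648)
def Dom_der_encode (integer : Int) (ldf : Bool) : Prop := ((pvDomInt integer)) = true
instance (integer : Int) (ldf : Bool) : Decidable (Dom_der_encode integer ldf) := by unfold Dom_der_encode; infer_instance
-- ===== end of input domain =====

-- B replaces A's bit-string assemble/pad/re-parse pipeline by direct byte/int arithmetic
-- (bit_length and to_bytes): simpler decomposition, same return value on all non-negative inputs.

-- ===== PORT A =====

-- shared ports of Python built-ins used by both sources: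
-- hex(n)[2:] / "{0:b}".format(n) for n ≥ 0: most-significant-first digit string (exact)
def pyDigitsGo (base : Nat) (n : Nat) : List Char :=
  if h : n = 0 ∨ base ≤ 1 then [] else
    pyDigitsGo base (n / base) ++ [Nat.digitChar (n % base)]
  termination_by n
  decreasing_by exact Nat.div_lt_self (by omega) (by omega)

def pyDigits (base : Nat) (n : Nat) : List Char :=
  if n = 0 then ['0'] else pyDigitsGo base n

-- str.zfill(width) for unsigned digit strings (exact on them)
def pyZfill (width : Nat) (s : List Char) : List Char :=
  List.replicate (width - s.length) '0' ++ s

-- int(s, base) for valid lowercase digit strings (exact on them; elsewhere Python raises)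
def digitVal (c : Char) : Nat := if 97 ≤ c.toNat then c.toNat - 87 else c.toNat - 48
def pyParse (base : Nat) (s : List Char) : Nat :=
  s.foldl (fun acc c => base * acc + digitVal c) 0

-- A's helper int_to_bits
def int_to_bits (our_bits : Nat) (chars : Nat) : List Char :=
  pyZfill chars (pyDigits 2 our_bits)

-- A's `while V_length > len(V)/2: V = "0" + V`
def padLoopA (V_length : Nat) (V : List Char) : List Char :=
  if V.length < 2 * V_length then padLoopA V_length ('0' :: V) else V
  termination_by 2 * V_length - V.length

-- A's helper longDefiniteForm (unreachable for |integer| ≤ 2^31, ported literally)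
def longDefiniteForm (V : List Char) : List Char :=
  let V_int := V.length / 2
  let V_hex := pyDigits 16 V_int
  let V_hex := if V_hex.length % 2 ≠ 0 then '0' :: V_hex else V_hex
  if V_hex.length > 2 || (int_to_bits V_int 8).headD ' ' == '1' then
    let L_int := V_hex.length / 2
    let L_bits := '1' :: int_to_bits L_int 7
    let L_hex := pyDigits 16 (pyParse 2 L_bits)
    L_hex ++ V_hex
  else V_hex

def der_encode (integer : Int) (ldf : Bool) : String :=
  -- T = "02"
  if integer < 0 then "" else  -- hex(integer)[2:] = "x…", int(…,16) raises ValueError: outside Pre_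
    let n := integer.toNat
    let V := pyDigits 16 n                          -- V = hex(integer)[2:]
    let m := pyParse 16 V                           -- int(V, 16)
    let bitVector := '0' :: int_to_bits m 0
    let bitVector := if bitVector.length % 8 ≠ 0 then
        List.replicate (8 - bitVector.length % 8) '0' ++ bitVector
      else bitVector
    let V_length := bitVector.length / 8            -- int(len(bitVector)/8)
    let V := pyDigits 16 (pyParse 2 bitVector)      -- hex(int(bitVector,2))[2:]
    let V := padLoopA V_length V
    if V_length ≤ 127 then
      let L := pyDigits 16 V_length
      let L := if L.length % 2 == 1 then '0' :: L else L
      String.mk ('0' :: '2' :: (L ++ V))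
    else if ldf then
      String.mk ('0' :: '2' :: (longDefiniteForm V ++ V))
    else
      String.mk ('0' :: '2' :: (['1','0','0','0','0','0','0','0'] ++ (V ++ List.replicate 16 '0')))

-- ===== PORT B =====

-- int.bit_length()
def pyBitLength (n : Nat) : Nat := if n = 0 then 0 else Nat.log2 n + 1
-- n.to_bytes(len, 'big').hex()  (exact for n < 256^len, the only way B calls it)
def toBytesHex (n len : Nat) : List Char := pyZfill (2 * len) (pyDigits 16 n)

def der_encode_alt (integer : Int) (ldf : Bool) : String :=
  if integer < 0 then "" else  -- integer.to_bytes raises OverflowError: outside Pre_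
    let n := integer.toNat
    let v_len := pyBitLength n / 8 + 1
    let V := toBytesHex n v_len
    if v_len ≤ 127 then
      String.mk ('0' :: '2' :: (pyZfill 2 (pyDigits 16 v_len) ++ V))
    else if ldf then
      let num := (pyBitLength v_len + 7) / 8
      String.mk ('0' :: '2' :: ((pyZfill 2 (pyDigits 16 (128 ||| num)) ++ toBytesHex v_len num) ++ V))
    else
      String.mk ('0' :: '2' :: (['1','0','0','0','0','0','0','0'] ++ (V ++ List.replicate 16 '0')))

-- ===== PRECONDITION & SPEC =====
-- Pre_ excludes negative integers, on which A raises ValueError (int('x…', 16)).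
def Pre_der_encode (integer : Int) (ldf : Bool) : Prop := 0 ≤ integer
instance (integer : Int) (ldf : Bool) : Decidable (Pre_der_encode integer ldf) := by
  unfold Pre_der_encode; infer_instance

def pvWitness_der_encode : Int × Bool := (300, true)

def Spec_der_encode (integer : Int) (ldf : Bool) (out : String) : Prop := out = der_encode_alt integer ldf
instance (integer : Int) (ldf : Bool) (out : String) : Decidable (Spec_der_encode integer ldf out) := by unfold Spec_der_encode; infer_instance

-- ===== CLAIM (what is proved, stated in full; the proofs are below) =====
def Claim_equal_der_encode : Prop := ∀ (integer : Int) (ldf : Bool), Dom_der_encode integer ldf → Pre_der_encode integer ldf → Spec_der_encode integer ldf (der_encode integer ldf)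

-- ===== LEMMAS AND PROOFS =====

theorem digitVal_digitChar : ∀ d, d < 16 → digitVal (Nat.digitChar d) = d := by decide

theorem pyDigitsGo_parse (base : Nat) (hb : 2 ≤ base) (hb16 : base ≤ 16) :
    ∀ n, ∀ acc, List.foldl (fun acc c => base * acc + digitVal c) acc (pyDigitsGo base n)
      = acc * base ^ (pyDigitsGo base n).length + n := by
  intro n
  induction n using Nat.strong_induction_on with
  | _ n ih =>
    intro acc
    rw [pyDigitsGo]
    by_cases h : n = 0 ∨ base ≤ 1
    · have hn0 : n = 0 := by omega
      subst hn0
      simp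
    · rw [dif_neg h]
      have hdiv : n / base < n := Nat.div_lt_self (by omega) (by omega)
      have hmod : n % base < 16 := lt_of_lt_of_le (Nat.mod_lt _ (by omega)) hb16
      rw [List.foldl_append]
      simp only [List.foldl_cons, List.foldl_nil, List.length_append, List.length_cons,
        List.length_nil]
      rw [ih (n / base) hdiv acc, digitVal_digitChar _ hmod]
      have hn : base * (n / base) + n % base = n := Nat.div_add_mod n base
      calc base * (acc * base ^ (pyDigitsGo base (n / base)).length + n / base) + n % base
          = acc * (base ^ (pyDigitsGo base (n / base)).length * base)
              + (base * (n / base) + n % base) := by ring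
        _ = acc * base ^ ((pyDigitsGo base (n / base)).length + (0 + 1)) + n := by
              rw [hn, pow_succ]

theorem pyDigitsGo_len2 : ∀ n, n ≠ 0 → (pyDigitsGo 2 n).length = Nat.log2 n + 1 := by
  intro n
  induction n using Nat.strong_induction_on with
  | _ n ih =>
    intro hn
    rw [pyDigitsGo]
    rw [dif_neg (by omega)]
    simp only [List.length_append, List.length_cons, List.length_nil]
    by_cases h2 : 2 ≤ n
    · have hhalf : n / 2 ≠ 0 := by omega
      rw [ih (n / 2) (by omega) hhalf]
      have hp : 0 < Nat.log 2 n := Nat.log_pos one_lt_two h2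
      rw [show Nat.log2 n = Nat.log2 (n / 2) + 1 by
        rw [Nat.log2_eq_log_two, Nat.log2_eq_log_two, Nat.log_div_base]; omega]
    · have h1 : n = 1 := by omega
      subst h1
      rw [show (1:Nat)/2 = 0 by decide, pyDigitsGo]
      simp
      rw [Nat.log2]
      decide

theorem pyDigitsGo_len_le (k : Nat) : ∀ n, n < 16 ^ k → (pyDigitsGo 16 n).length ≤ k := by
  induction k with
  | zero =>
    intro n hn
    have : n = 0 := by simpa using hn
    rw [pyDigitsGo]; simp [this]
  | succ k ih =>
    intro n hn
    rw [pyDigitsGo]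
    by_cases h : n = 0 ∨ (16:Nat) ≤ 1
    · have h0 : n = 0 := by omega
      simp [h0]
    · rw [dif_neg h]
      simp only [List.length_append, List.length_cons, List.length_nil]
      have : n / 16 < 16 ^ k := by
        rw [Nat.div_lt_iff_lt_mul (by norm_num)]
        calc n < 16 ^ (k + 1) := hn
          _ = 16 ^ k * 16 := by rw [pow_succ]
      have := ih (n / 16) this
      omega

theorem pyParse_digits (base : Nat) (hb : 2 ≤ base) (hb16 : base ≤ 16) (n : Nat) :
    pyParse base (pyDigits base n) = n := by
  unfold pyParse pyDigits
  by_cases hn : n = 0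
  · simp [hn, digitVal]
  · rw [if_neg hn, pyDigitsGo_parse base hb hb16 n 0]
    ring

theorem pyParse_repl_zero (base : Nat) (z : Nat) (s : List Char) :
    pyParse base (List.replicate z '0' ++ s) = pyParse base s := by
  unfold pyParse
  rw [List.foldl_append]
  congr 1
  induction z with
  | zero => simp
  | succ z ih => rw [List.replicate_succ]; simpa [digitVal] using ih

theorem repl_cons (k : Nat) (l : List Char) :
    List.replicate k '0' ++ '0' :: l = List.replicate (k + 1) '0' ++ l := by
  rw [List.replicate_succ', List.append_assoc]; rfl

theorem padLoopA_eq_zfill (t : Nat) : ∀ V : List Char, V.length ≤ 2 * t →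
    padLoopA t V = pyZfill (2 * t) V := by
  suffices H : ∀ k (V : List Char), V.length ≤ 2 * t → 2 * t - V.length ≤ k →
      padLoopA t V = pyZfill (2 * t) V by
    intro V h; exact H (2 * t) V h (by omega)
  intro k
  induction k with
  | zero =>
    intro V h1 h2
    rw [padLoopA, if_neg (by omega)]
    unfold pyZfill
    rw [show 2 * t - V.length = 0 by omega]
    simp
  | succ k ih =>
    intro V h1 h2
    rw [padLoopA]
    by_cases hlt : V.length < 2 * t
    · rw [if_pos hlt]
      rw [ih ('0' :: V) (by simp; omega) (by simp; omega)]
      unfold pyZfill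
      rw [repl_cons, show 2 * t - ('0' :: V).length + 1 = 2 * t - V.length by simp; omega]
    · rw [if_neg hlt]
      unfold pyZfill
      rw [show 2 * t - V.length = 0 by omega]
      simp

theorem pyDigits_small (k : Nat) (h0 : k ≠ 0) (h16 : k < 16) :
    pyDigits 16 k = [Nat.digitChar k] := by
  unfold pyDigits
  rw [if_neg h0, pyDigitsGo, dif_neg (by omega), pyDigitsGo]
  simp [Nat.div_eq_of_lt h16, Nat.mod_eq_of_lt h16]

theorem pyParse_pyDigits2 (n : Nat) (m : Nat) :
    pyParse 2 (List.replicate m '0' ++ pyDigits 2 n) = n := by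
  rw [pyParse_repl_zero, pyParse_digits 2 (by norm_num) (by norm_num)]

theorem hex_len_le (n VL : Nat) (h : (if n = 0 then 1 else Nat.log2 n + 1) ≤ 8 * VL) :
    (pyDigits 16 n).length ≤ 2 * VL := by
  by_cases hn : n = 0
  · subst hn
    simp [pyDigits] at h ⊢
    omega
  · unfold pyDigits
    rw [if_neg hn]
    apply pyDigitsGo_len_le
    have h1 : n < 2 ^ (Nat.log2 n + 1) := Nat.lt_log2_self
    have h2 : (2:Nat) ^ (Nat.log2 n + 1) ≤ 2 ^ (8 * VL) := by
      apply Nat.pow_le_pow_right (by norm_num)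
      simp [hn] at h
      omega
    calc n < 2 ^ (Nat.log2 n + 1) := h1
      _ ≤ 2 ^ (8 * VL) := h2
      _ = 16 ^ (2 * VL) := by
          rw [show (16:Nat) = 2 ^ 4 from rfl, ← pow_mul]
          ring_nf

-- the common continuation of both programs once the value octets and their count agree
theorem tail_common (n VL : Nat) (h1 : 1 ≤ VL) (h5 : VL ≤ 5)
    (hhex : (pyDigits 16 n).length ≤ 2 * VL) :
    (if (pyDigits 16 VL).length % 2 == 1 then '0' :: pyDigits 16 VL else pyDigits 16 VL)
        ++ padLoopA VL (pyDigits 16 n)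
    = pyZfill 2 (pyDigits 16 VL) ++ toBytesHex n VL := by
  rw [pyDigits_small VL (by omega) (by omega), padLoopA_eq_zfill VL _ hhex]
  simp [pyZfill, toBytesHex]

theorem main_eq (n : Nat) (hle : n ≤ 2 ^ 31) (ldf : Bool) :
    der_encode (n : Int) ldf = der_encode_alt (n : Int) ldf := by
  have hneg : ¬ ((n : Int) < 0) := not_lt.mpr (Int.natCast_nonneg n)
  have e2 : int_to_bits n 0 = pyDigits 2 n := by
    unfold int_to_bits pyZfill
    simp
  have hbc : (pyDigits 2 n).length = if n = 0 then 1 else Nat.log2 n + 1 := by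
    by_cases hn : n = 0
    · simp [hn, pyDigits]
    · simp [pyDigits, hn, pyDigitsGo_len2 n hn]
  have hlog : Nat.log2 n ≤ 31 := by
    by_cases hn : n = 0
    · rw [hn, Nat.log2_eq_log_two]
      simp
    · have := (Nat.log2_lt hn).mpr (show n < 2 ^ 32 by omega)
      omega
  have hBLe : pyBitLength n = if n = 0 then 0 else Nat.log2 n + 1 := rfl
  have hBL32 : pyBitLength n ≤ 32 := by
    rw [hBLe]; by_cases hn : n = 0 <;> simp [hn] <;> omega
  have h127 : pyBitLength n / 8 + 1 ≤ 127 := by omega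
  have hhex : (pyDigits 16 n).length ≤ 2 * (pyBitLength n / 8 + 1) := by
    apply hex_len_le
    by_cases hn : n = 0
    · simp [hn, pyBitLength]
    · rw [if_neg hn]
      have hx : pyBitLength n = n.log2 + 1 := by rw [hBLe, if_neg hn]
      omega
  unfold der_encode der_encode_alt
  rw [if_neg hneg, if_neg hneg]
  simp only [Int.toNat_natCast, pyParse_digits 16 (by norm_num) (by norm_num), e2]
  by_cases hmod : ('0' :: pyDigits 2 n).length % 8 ≠ 0
  · rw [if_pos hmod]
    rw [repl_cons]
    rw [pyParse_pyDigits2]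
    simp only [List.length_append, List.length_replicate, List.length_cons]
    simp only [List.length_cons] at hmod
    set b := (pyDigits 2 n).length with hb
    have hVL : (8 - (b + 1) % 8 + 1 + b) / 8 = pyBitLength n / 8 + 1 := by
      rw [hBLe]
      by_cases hn : n = 0
      · rw [if_pos hn]
        rw [hbc, if_pos hn]
      · rw [if_neg hn]
        rw [hbc, if_neg hn] at hmod ⊢
        omega
    rw [hVL]
    rw [if_pos h127, if_pos h127]
    rw [tail_common n _ (by omega) (by omega) hhex]
  · rw [if_neg hmod]
    rw [show ('0' :: pyDigits 2 n) = List.replicate 1 '0' ++ pyDigits 2 n from rfl]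
    rw [pyParse_pyDigits2]
    simp only [List.length_append, List.length_replicate, List.length_cons] at hmod ⊢
    set b := (pyDigits 2 n).length with hb
    have hVL : (1 + b) / 8 = pyBitLength n / 8 + 1 := by
      rw [hBLe]
      by_cases hn : n = 0
      · rw [hbc, if_pos hn] at hmod
        omega
      · rw [if_neg hn]
        rw [hbc, if_neg hn] at hmod ⊢
        omega
    rw [hVL]
    rw [if_pos h127, if_pos h127]
    rw [tail_common n _ (by omega) (by omega) hhex]
-- ===== VERDICT (by name: the statement is the Claim_ definition above) =====
theorem der_encode_spec : Claim_equal_der_encode := by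
  intro integer ldf hdom hpre
  unfold Spec_der_encode
  have h0 : 0 ≤ integer := hpre
  have hle : integer.toNat ≤ 2 ^ 31 := by
    unfold Dom_der_encode pvDomInt at hdom
    simp at hdom
    omega
  have := main_eq integer.toNat hle ldf
  rwa [Int.toNat_of_nonneg h0] at this
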